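-- pv_equiv track=rewrite | github.com/vrasmus/AdventOfCode | 2023/day13/day13.py | horizontal_value
-- ===== SOURCE A (Python) =====
-- def dist(row1, row2):
--     return sum([c1 != c2 for (c1, c2) in zip(row1, row2)])
--
-- def horizontal_value(pattern, target_dist):
--     for i in range(len(pattern) - 1):
--         total_dist = 0
--         for row1, row2 in zip(pattern[i + 1:], pattern[i::-1]):
--             total_dist += dist(row1, row2)
--         if total_dist == target_dist:
--             return i + 1
--     return 0
-- ===== SOURCE B (Python) =====
-- def horizontal_value(pattern, target_dist):
--     n = len(pattern)
--     # one pass over unordered row pairs, bucketed by anti-diagonal: a pair (a, b)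
--     # with a + b = 2*i + 1 contributes to the mirror line after row i
--     totals = [0] * (n - 1)
--     for a in range(n):
--         for b in range(a + 1, n):
--             if (a + b) % 2 == 1:
--                 totals[(a + b - 1) // 2] += sum(c1 != c2 for c1, c2 in zip(pattern[a], pattern[b]))
--     for i, s in enumerate(totals):
--         if s == target_dist:
--             return i + 1
--     return 0
-- ===== Notes on version B (the rewrite author's own statement) =====
-- stated objective: alternative
-- what changed: Replaces A's per-candidate mirror scan (zip of a forward slice with a reversed prefix for each line) by a single pass over all unordered row pairs that buckets each pair's Hamming distance into the anti-diagonal a+b=2i+1 of a totals array, followed by a linear scan of the totals; this gives up A's early exit, so B is not faster.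
import Mathlib
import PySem

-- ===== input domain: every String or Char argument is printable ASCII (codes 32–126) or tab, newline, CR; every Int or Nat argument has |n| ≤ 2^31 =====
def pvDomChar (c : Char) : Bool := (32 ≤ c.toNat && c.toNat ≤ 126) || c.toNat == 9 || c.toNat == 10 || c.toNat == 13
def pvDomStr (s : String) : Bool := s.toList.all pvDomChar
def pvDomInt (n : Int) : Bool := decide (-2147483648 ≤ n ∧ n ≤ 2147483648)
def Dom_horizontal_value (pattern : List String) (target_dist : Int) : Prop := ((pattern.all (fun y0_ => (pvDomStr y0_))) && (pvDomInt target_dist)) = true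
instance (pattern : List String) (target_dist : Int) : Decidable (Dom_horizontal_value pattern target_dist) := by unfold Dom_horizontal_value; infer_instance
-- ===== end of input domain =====

-- B replaces A's per-candidate mirror scan (zip of slice with reversed prefix) by one pass
-- over all unordered row pairs bucketing each pair's distance into the anti-diagonal
-- a+b = 2i+1 of a totals array, then a linear scan (alternative decomposition; same total
-- cost, but B gives up A's early exit, so it can be slower when A returns a small line).


-- ===== PORT A =====
-- dist(row1,row2) = sum([c1 != c2 for (c1,c2) in zip(row1,row2)])  (builds the list, then sums)
def pyDist (r1 r2 : String) : Int :=
  ((r1.toList.zip r2.toList).map (fun cc => if cc.1 ≠ cc.2 then (1 : Int) else 0)).sum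

-- the 'for i in range(...)' loop with its early return
def hvLoopA (pattern : List String) (target_dist : Int) : List Int → Int
  | [] => 0
  | i :: rest =>
      -- pattern[i+1:] via PySem slice; pattern[i::-1] ported by hand as the reversed
      -- prefix up to i — exact here since i comes from range(len(pattern)-1), so 0 ≤ i
      let fwd := PySem.List.slice pattern (some (i + 1)) none
      let bwd := (pattern.take (i.toNat + 1)).reverse
      let total := (fwd.zip bwd).foldl (fun acc pr => acc + pyDist pr.1 pr.2) 0
      if total = target_dist then i + 1 else hvLoopA pattern target_dist rest

def horizontal_value (pattern : List String) (target_dist : Int) : Int :=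
  hvLoopA pattern target_dist (PySem.List.pyRange 0 ((pattern.length : Int) - 1) 1)

-- ===== PORT B =====
-- B's dist: sum(c1 != c2 for ...) as a running fold
def pyDistB (r1 r2 : String) : Int :=
  (r1.toList.zip r2.toList).foldl (fun acc cc => acc + (if cc.1 ≠ cc.2 then (1 : Int) else 0)) 0

-- 'totals[(a+b-1)//2] += dist(pattern[a], pattern[b])' when (a+b)%2 == 1; indices are
-- always in range in B, so the pyGetD/pySetD defaults are never used
def bucketStep (pattern : List String) (T : List Int) (ab : Int × Int) : List Int :=
  if PySem.Int.mod (ab.1 + ab.2) 2 = 1 then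
    let k := PySem.Int.floordiv (ab.1 + ab.2 - 1) 2
    PySem.List.pySetD T k (PySem.List.pyGetD T k 0 +
      pyDistB (PySem.List.pyGetD pattern ab.1 "") (PySem.List.pyGetD pattern ab.2 ""))
  else T

-- 'for i, s in enumerate(totals): if s == target_dist: return i + 1' / 'return 0'
def scanEnum (t : Int) : List (Int × Int) → Int
  | [] => 0
  | (i, s) :: rest => if s = t then i + 1 else scanEnum t rest

def horizontal_value_alt (pattern : List String) (target_dist : Int) : Int :=
  let n : Int := pattern.length
  let totals0 : List Int := List.replicate (n - 1).toNat 0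
  let totals := (PySem.List.pyRange 0 n 1).foldl (fun T a =>
    (PySem.List.pyRange (a + 1) n 1).foldl (fun T b => bucketStep pattern T (a, b)) T) totals0
  scanEnum target_dist (PySem.List.enumerate totals 0)

-- ===== PRECONDITION & SPEC =====
def Spec_horizontal_value (pattern : List String) (target_dist : Int) (out : Int) : Prop := out = horizontal_value_alt pattern target_dist
instance (pattern : List String) (target_dist : Int) (out : Int) : Decidable (Spec_horizontal_value pattern target_dist out) := by unfold Spec_horizontal_value; infer_instance

-- ===== CLAIM (what is proved, stated in full; the proofs are below) =====
def Claim_equal_horizontal_value : Prop := ∀ (pattern : List String) (target_dist : Int), Dom_horizontal_value pattern target_dist → Spec_horizontal_value pattern target_dist (horizontal_value pattern target_dist)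

-- ===== LEMMAS AND PROOFS =====

-- B's running dist fold equals A's list-then-sum dist
theorem pyDistB_eq (r1 r2 : String) : pyDistB r1 r2 = pyDist r1 r2 := by
  unfold pyDistB pyDist
  rw [PySem.List.foldl_add]
  simp

-- dist is symmetric
theorem pyDist_comm (r1 r2 : String) : pyDist r1 r2 = pyDist r2 r1 := by
  unfold pyDist
  rw [← List.zip_swap r2.toList r1.toList, List.map_map]
  congr 1
  apply List.map_congr_left
  intro cc _
  by_cases h : cc.1 = cc.2 <;> simp [h, Function.comp, ne_comm]

-- the number of mirrored pairs around the line after row j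
def pairCount (len j : Nat) : Nat := min (len - (j + 1)) (j + 1)

-- A's zipped slice pair list, element by element
theorem zip_eq_range_map (p : List String) (j : Nat) :
    ((p.drop (j + 1)).zip ((p.take (j + 1)).reverse))
      = (List.range (pairCount p.length j)).map
          (fun k => (p.getD (j + 1 + k) "", p.getD (j - k) "")) := by
  apply List.ext_getElem
  · simp [pairCount]; omega
  · intro k h1 h2
    have hlen : k < pairCount p.length j := by
      simp [pairCount] at h1 ⊢; omega
    have hk1 : j + 1 + k < p.length := by simp [pairCount] at hlen; omega
    have hk2 : k ≤ j := by simp [pairCount] at hlen; omega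
    simp only [List.getElem_zip, List.getElem_map, List.getElem_range]
    congr 1
    · rw [List.getElem_drop, List.getD_eq_getElem?_getD,
          List.getElem?_eq_getElem (by omega : j + 1 + k < p.length)]
      simp [Nat.add_comm]
    · rw [List.getElem_reverse, List.getElem_take, List.getD_eq_getElem?_getD,
          List.getElem?_eq_getElem (by omega : j - k < p.length)]
      congr 1
      simp [List.length_take]
      omega

-- bucketStep preserves the length of the totals list
theorem length_bucketStep (p : List String) (T : List Int) (ab : Int × Int) :
    (bucketStep p T ab).length = T.length := by
  unfold bucketStep
  split <;> simp [PySem.List.length_pySetD]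

theorem length_foldl_bucketStep (p : List String) (ps : List (Int × Int)) :
    ∀ (T : List Int), (ps.foldl (bucketStep p) T).length = T.length := by
  induction ps with
  | nil => intro T; rfl
  | cons ab rest ih => intro T; rw [List.foldl_cons, ih, length_bucketStep]

-- getD after set
theorem getD_set_self (T : List Int) (i : Nat) (h : i < T.length) (v : Int) :
    (T.set i v).getD i 0 = v := by
  simp [List.getD_eq_getElem?_getD, h]

theorem getD_set_ne (T : List Int) (i j : Nat) (h : j ≠ i) (v : Int) :
    (T.set j v).getD i 0 = T.getD i 0 := by
  simp [List.getD_eq_getElem?_getD, h]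

-- the bucket fold: entry i of the result is entry i of the start plus the distances of
-- all processed pairs on anti-diagonal a + b = 2i + 1
theorem foldl_bucket_getD (p : List String) (i : Nat) :
    ∀ (ps : List (Int × Int)) (T : List Int),
    (∀ ab ∈ ps, 0 ≤ ab.1 ∧ ab.1 < ab.2 ∧ ab.1 + ab.2 < 2 * (T.length : Int)) →
    (ps.foldl (bucketStep p) T).getD i 0
      = T.getD i 0 + ((ps.filter (fun ab => ab.1 + ab.2 = 2 * (i : Int) + 1)).map
          (fun ab => pyDist (PySem.List.pyGetD p ab.1 "") (PySem.List.pyGetD p ab.2 ""))).sum := by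
  intro ps
  induction ps with
  | nil => intro T _; simp
  | cons ab rest ih =>
      intro T h
      obtain ⟨a, b⟩ := ab
      obtain ⟨ha, hlt, hsum⟩ := h (a, b) (by simp)
      rw [List.foldl_cons,
          ih (bucketStep p T (a, b)) (by
            intro ab hm
            rw [length_bucketStep]
            exact h ab (List.mem_cons_of_mem _ hm))]
      by_cases hd : a + b = 2 * (i : Int) + 1
      · have hmod : PySem.Int.mod (a + b) 2 = (a + b) % 2 :=
          PySem.Int.mod_eq_emod_of_pos (by norm_num)
        have hcond : PySem.Int.mod (a + b) 2 = 1 := by rw [hmod]; omega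
        have hfd : PySem.Int.floordiv (a + b - 1) 2 = (a + b - 1) / 2 :=
          PySem.Int.floordiv_eq_ediv_of_pos (by norm_num)
        have hk : PySem.Int.floordiv (a + b - 1) 2 = (i : Int) := by rw [hfd]; omega
        have hilt : i < T.length := by omega
        have hget : PySem.List.pyGetD T ((i : Nat) : Int) 0 = T.getD i 0 := by
          simp [PySem.List.pyGetD_natCast]
        unfold bucketStep
        simp only [if_pos hcond, hk]
        rw [PySem.List.pySetD_of_nonneg _ _ (by omega)]
        simp only [Int.toNat_natCast]
        rw [getD_set_self T i hilt, hget, List.filter_cons]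
        simp only [hd, decide_true, if_pos, List.map_cons, List.sum_cons, pyDistB_eq]
        ring
      · rw [List.filter_cons]
        have hne : ¬ (decide ((a, b).1 + (a, b).2 = 2 * (i : Int) + 1) = true) := by
          simpa using hd
        rw [if_neg hne]
        congr 1
        unfold bucketStep
        by_cases hcond : PySem.Int.mod (a + b) 2 = 1
        · simp only [if_pos hcond]
          have hfd : PySem.Int.floordiv (a + b - 1) 2 = (a + b - 1) / 2 :=
            PySem.Int.floordiv_eq_ediv_of_pos (by norm_num)
          rw [PySem.List.pySetD_of_nonneg _ _ (by rw [hfd]; omega)]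
          apply getD_set_ne
          have hmod : PySem.Int.mod (a + b) 2 = (a + b) % 2 :=
            PySem.Int.mod_eq_emod_of_pos (by norm_num)
          rw [hmod] at hcond
          rw [hfd]
          omega
        · simp only [if_neg hcond]

-- filtering a range to an interval clips the range
theorem pyRange_filter_interval (lo hi l h : Int) :
    (PySem.List.pyRange lo hi 1).filter (fun x => decide (l ≤ x ∧ x < h))
      = PySem.List.pyRange (max lo l) (min hi h) 1 := by
  by_cases hle : hi ≤ lo
  · rw [PySem.List.pyRange_one_eq_nil hle, PySem.List.pyRange_one_eq_nil (by omega)]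
    rfl
  · rw [not_le] at hle
    rw [PySem.List.pyRange_one_cons hle, List.filter_cons]
    by_cases hin : l ≤ lo ∧ lo < h
    · rw [if_pos (by simpa using hin), pyRange_filter_interval (lo + 1) hi l h,
          show max (lo + 1) l = lo + 1 by omega, show max lo l = lo by omega,
          PySem.List.pyRange_one_cons (show lo < min hi h by omega)]
    · rw [if_neg (by simpa using hin), pyRange_filter_interval (lo + 1) hi l h]
      by_cases hll : lo < l
      · rw [show max (lo + 1) l = max lo l by omega]
      · rw [PySem.List.pyRange_one_eq_nil (by omega), PySem.List.pyRange_one_eq_nil (by omega)]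
termination_by (hi - lo).toNat
decreasing_by all_goals omega

-- the anti-diagonal blocks of the pair list, flattened, form one clipped range
theorem flat_diag (n i : Int) (lo : Int) :
    (PySem.List.pyRange lo n 1).flatMap
        (fun a => (PySem.List.pyRange (max (a + 1) (2 * i + 1 - a)) (min n (2 * i + 2 - a)) 1).map
          (fun b => (a, b)))
      = (PySem.List.pyRange (max lo (2 * i + 2 - n)) (min n (i + 1)) 1).map
          (fun a => (a, 2 * i + 1 - a)) := by
  by_cases hle : n ≤ lo
  · rw [PySem.List.pyRange_one_eq_nil hle, PySem.List.pyRange_one_eq_nil (by omega)]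
    rfl
  · rw [not_le] at hle
    rw [PySem.List.pyRange_one_cons hle, List.flatMap_cons, flat_diag n i (lo + 1)]
    by_cases hA : lo ≤ i ∧ 2 * i + 2 - n ≤ lo
    · rw [show max (lo + 1) (2 * i + 1 - lo) = 2 * i + 1 - lo by omega,
          show min n (2 * i + 2 - lo) = (2 * i + 1 - lo) + 1 by omega,
          PySem.List.pyRange_one_singleton,
          show max (lo + 1) (2 * i + 2 - n) = lo + 1 by omega,
          show max lo (2 * i + 2 - n) = lo by omega,
          PySem.List.pyRange_one_cons (show lo < min n (i + 1) by omega)]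
      simp
    · rw [PySem.List.pyRange_one_eq_nil (by omega)]
      simp only [List.map_nil, List.nil_append]
      by_cases hll : lo < 2 * i + 2 - n
      · rw [show max (lo + 1) (2 * i + 2 - n) = max lo (2 * i + 2 - n) by omega]
      · rw [PySem.List.pyRange_one_eq_nil (by omega), PySem.List.pyRange_one_eq_nil (by omega)]
termination_by (n - lo).toNat
decreasing_by all_goals omega

-- filtering the generated pair list to one anti-diagonal
theorem pairs_filter (n i : Int) :
    (((PySem.List.pyRange 0 n 1).flatMap
        (fun a => (PySem.List.pyRange (a + 1) n 1).map (fun b => (a, b)))).filter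
      (fun ab => ab.1 + ab.2 = 2 * i + 1))
    = (PySem.List.pyRange (max 0 (2 * i + 2 - n)) (min n (i + 1)) 1).map
        (fun a => (a, 2 * i + 1 - a)) := by
  rw [List.filter_flatMap]
  have hblk : ∀ a : Int,
      ((PySem.List.pyRange (a + 1) n 1).map (fun b => (a, b))).filter
          (fun ab => decide (ab.1 + ab.2 = 2 * i + 1))
        = (PySem.List.pyRange (max (a + 1) (2 * i + 1 - a)) (min n (2 * i + 2 - a)) 1).map
            (fun b => (a, b)) := by
    intro a
    rw [List.filter_map]
    have hp : ((fun ab : Int × Int => decide (ab.1 + ab.2 = 2 * i + 1)) ∘ (fun b => (a, b)))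
        = fun b : Int => decide (2 * i + 1 - a ≤ b ∧ b < 2 * i + 1 - a + 1) := by
      funext b
      show decide (a + b = 2 * i + 1) = _
      exact decide_eq_decide.mpr (by omega)
    rw [hp, pyRange_filter_interval, show 2 * i + 1 - a + 1 = 2 * i + 2 - a by ring]
  simp only [hblk]
  exact flat_diag n i 0

-- nested fold = fold over the flattened pair list
theorem nested_fold_eq (p : List String) (n : Int) (T0 : List Int) :
    (PySem.List.pyRange 0 n 1).foldl (fun T a =>
        (PySem.List.pyRange (a + 1) n 1).foldl (fun T b => bucketStep p T (a, b)) T) T0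
      = ((PySem.List.pyRange 0 n 1).flatMap
          (fun a => (PySem.List.pyRange (a + 1) n 1).map (fun b => (a, b)))).foldl
          (bucketStep p) T0 := by
  induction (PySem.List.pyRange 0 n 1) generalizing T0 with
  | nil => rfl
  | cons a rest ih =>
      rw [List.foldl_cons, List.flatMap_cons, List.foldl_append, List.foldl_map, ih]

-- per-candidate totals agree: A's mirror-scan total = B's bucket entry
theorem total_eq (p : List String) (j : Nat) (hj : j + 1 < p.length) :
    ((PySem.List.slice p (some ((j : Int) + 1)) none).zip ((p.take (((j : Int)).toNat + 1)).reverse)).foldl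
        (fun acc pr => acc + pyDist pr.1 pr.2) 0
      = (((PySem.List.pyRange 0 (p.length : Int) 1).foldl (fun T a =>
          (PySem.List.pyRange (a + 1) (p.length : Int) 1).foldl
            (fun T b => bucketStep p T (a, b)) T)
          (List.replicate ((p.length : Int) - 1).toNat 0)).getD j 0) := by
  rw [nested_fold_eq]
  rw [foldl_bucket_getD p j _ _ (by
    intro ab hm
    simp only [List.mem_flatMap, List.mem_map] at hm
    obtain ⟨a, ha, b, hb, rfl⟩ := hm
    rw [PySem.List.mem_pyRange_one] at ha hb
    simp only [List.length_replicate]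
    omega)]
  rw [show (List.replicate ((p.length : Int) - 1).toNat (0 : Int)).getD j 0 = 0 from by
    simp only [List.getD_eq_getElem?_getD, List.getElem?_replicate]
    split <;> rfl]
  rw [pairs_filter, zero_add]
  rw [PySem.List.slice_from _ (by omega : (0 : Int) ≤ (j : Int) + 1)]
  rw [show ((j : Int) + 1).toNat = j + 1 by omega, Int.toNat_natCast]
  rw [zip_eq_range_map p j, PySem.List.foldl_add, zero_add]
  rw [List.map_map, List.map_map, PySem.List.pyRange_one, List.map_map]
  have hpc : ((min ((p.length:Int)) ((j:Int) + 1)) - (max 0 (2 * (j:Int) + 2 - (p.length:Int)))).toNat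
      = pairCount p.length j := by
    simp only [pairCount]
    omega
  rw [hpc]
  have hconv : ∀ (m : Nat) (F : Nat → Int), ((List.range m).map F).sum = ∑ k ∈ Finset.range m, F k := by
    intro m F; rfl
  rw [hconv, hconv, ← Finset.sum_range_reflect]
  apply Finset.sum_congr rfl
  intro k hk
  rw [Finset.mem_range] at hk
  have hp1 : pairCount p.length j ≤ j + 1 := by simp only [pairCount]; omega
  have hp2 : pairCount p.length j + j + 1 ≤ p.length := by simp only [pairCount]; omega
  simp only [Function.comp]
  have hL : max 0 (2 * (j:Int) + 2 - (p.length:Int)) = (j:Int) + 1 - pairCount p.length j := by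
    simp only [pairCount]
    omega
  rw [hL]
  have e1 : (j:Int) + 1 - pairCount p.length j + (k:Int)
      = ((j + 1 - pairCount p.length j + k : Nat) : Int) := by omega
  have e2 : 2 * (j:Int) + 1 - ((j + 1 - pairCount p.length j + k : Nat) : Int)
      = ((j + pairCount p.length j - k : Nat) : Int) := by omega
  rw [e1, PySem.List.pyGetD_natCast, e2, PySem.List.pyGetD_natCast, pyDist_comm]
  congr 2 <;> omega

-- the two scanning loops agree
theorem loops_eq (p : List String) (t : Int) (totals : List Int)
    (hlen : totals.length + 1 = p.length)
    (htot : ∀ j : Nat, j + 1 < p.length →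
      ((PySem.List.slice p (some ((j : Int) + 1)) none).zip
          ((p.take (((j : Int)).toNat + 1)).reverse)).foldl
        (fun acc pr => acc + pyDist pr.1 pr.2) 0 = totals.getD j 0) :
    hvLoopA p t (PySem.List.pyRange 0 ((p.length : Int) - 1) 1)
      = scanEnum t (PySem.List.enumerate totals 0) := by
  rw [PySem.List.enumerate_eq_map_pyRange totals 0, PySem.List.len_eq,
      show ((totals.length : Int)) = (p.length : Int) - 1 from by omega]
  have aux : ∀ l : List Int, (∀ x ∈ l, 0 ≤ x ∧ x + 1 < (p.length : Int)) →
      hvLoopA p t l = scanEnum t (l.map (fun j => (j, PySem.List.pyGetD totals j 0))) := by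
    intro l
    induction l with
    | nil => intro _; rfl
    | cons i rest ih =>
        intro h
        obtain ⟨hi0, hilt⟩ := h i (by simp)
        have hcast : ((i.toNat : Nat) : Int) = i := by omega
        have hg : PySem.List.pyGetD totals i 0 = totals.getD i.toNat 0 := by
          rw [← hcast, PySem.List.pyGetD_natCast, Int.toNat_natCast]
        have htoti := htot i.toNat (by omega)
        rw [hcast] at htoti
        rw [List.map_cons]
        show (if _ = t then i + 1 else hvLoopA p t rest) = _
        rw [scanEnum, htoti, hg]
        by_cases hc : totals.getD i.toNat 0 = t
        · rw [if_pos hc, if_pos hc]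
        · rw [if_neg hc, if_neg hc, ih (fun x hx => h x (List.mem_cons_of_mem _ hx))]
  apply aux
  intro x hx
  have := (PySem.List.mem_pyRange_one).mp hx
  omega

-- ===== VERDICT (by name: the statement is the Claim_ definition above) =====
theorem horizontal_value_spec : Claim_equal_horizontal_value := by
  intro p t _
  show horizontal_value p t = horizontal_value_alt p t
  by_cases hp : p = []
  · subst hp; rfl
  · simp only [horizontal_value, horizontal_value_alt]
    apply loops_eq
    · rw [nested_fold_eq, length_foldl_bucketStep, List.length_replicate]
      have : p.length ≠ 0 := fun h => hp (List.length_eq_zero_iff.mp h)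
      omega
    · intro j hj
      exact total_eq p j hj
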